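-- pv_equiv track=rewrite | github.com/dingtaoliu/handler | src/handler/google_oauth.py | _pick_console_redirect_uri
-- ===== SOURCE A (Python) =====
-- from collections.abc import Mapping
--
-- def _pick_console_redirect_uri(client_config: Mapping[str, object]) -> str:
--     redirect_uris = [
--         str(value).strip()
--         for value in client_config.get("redirect_uris", [])
--         if str(value).strip()
--     ]
--     if not redirect_uris:
--         raise ValueError("OAuth client is missing redirect_uris")
--
--     for prefix in (
--         "http://localhost",
--         "http://127.0.0.1",
--         "https://localhost",
--         "https://127.0.0.1",
--     ):
--         for redirect_uri in redirect_uris: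
--             if redirect_uri.startswith(prefix):
--                 return redirect_uri
--
--     return redirect_uris[0]
-- ===== SOURCE B (Python) =====
-- _PREFIXES = (
--     "http://localhost",
--     "http://127.0.0.1",
--     "https://localhost",
--     "https://127.0.0.1",
-- )
--
--
-- def _rank(uri):
--     """Index of the first preferred prefix that uri starts with, or len(_PREFIXES)."""
--     return next((i for i, p in enumerate(_PREFIXES) if uri.startswith(p)), len(_PREFIXES))
--
--
-- def _pick_console_redirect_uri(client_config):
--     redirect_uris = [
--         str(value).strip()
--         for value in client_config.get("redirect_uris", [])
--         if str(value).strip()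
--     ]
--     if not redirect_uris:
--         raise ValueError("OAuth client is missing redirect_uris")
--
--     best = redirect_uris[0]
--     best_rank = _rank(best)
--     for uri in redirect_uris[1:]:
--         r = _rank(uri)
--         if r < best_rank:
--             best, best_rank = uri, r
--     return best
-- ===== Notes on version B (the rewrite author's own statement) =====
-- stated objective: alternative
-- what changed: A scans the whole URI list once per preferred prefix (nested loops with early return); B assigns each URI a priority rank (index of the first matching prefix, or 4) and does a single argmin pass over the list, strict-< updates giving the same first-minimal tie-breaking; the empty-list ValueError guard is unchanged.
import Mathlib
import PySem

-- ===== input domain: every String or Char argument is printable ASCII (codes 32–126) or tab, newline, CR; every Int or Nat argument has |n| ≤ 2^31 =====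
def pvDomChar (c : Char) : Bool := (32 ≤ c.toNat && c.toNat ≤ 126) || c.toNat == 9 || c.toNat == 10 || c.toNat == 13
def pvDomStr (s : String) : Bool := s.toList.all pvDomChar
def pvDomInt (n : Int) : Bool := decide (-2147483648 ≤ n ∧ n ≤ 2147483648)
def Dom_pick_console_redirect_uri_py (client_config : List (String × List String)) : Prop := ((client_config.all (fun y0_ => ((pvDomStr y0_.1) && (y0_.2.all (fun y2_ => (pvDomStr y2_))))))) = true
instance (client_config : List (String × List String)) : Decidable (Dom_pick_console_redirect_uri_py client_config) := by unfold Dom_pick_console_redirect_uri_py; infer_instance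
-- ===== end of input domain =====

-- B replaces A's nested prefix-priority search (one scan of the URI list per prefix) by a single
-- argmin pass over ranks (index of the first matching prefix, or 4); return value only, no mutation.

-- ===== PORT A =====
-- the four preferred prefixes, as in both Pythons
def pvPrefixes : List String :=
  ["http://localhost", "http://127.0.0.1", "https://localhost", "https://127.0.0.1"]

-- shared preprocessing (identical comprehension in both Pythons):
-- [str(v).strip() for v in client_config.get("redirect_uris", []) if str(v).strip()]
def pvUris (client_config : List (String × List String)) : List String :=
  (((PySem.Dict.mk client_config).getD "redirect_uris" []).map PySem.Str.strip).filter
    (fun s => s != "")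

-- A's nested loops with early return: for prefix … : for uri … : if startswith: return uri
def pvLoopA : List String → List String → Option String
  | [], _ => none
  | p :: ps, us =>
    match us.find? (fun u => PySem.Str.startswith u p) with
    | some u => some u
    | none => pvLoopA ps us

def pick_console_redirect_uri_py (client_config : List (String × List String)) : String :=
  let us := pvUris client_config
  if us.isEmpty then ""   -- Python raises ValueError here; excluded by Pre_
  else
    match pvLoopA pvPrefixes us with
    | some u => u
    | none => us.headD ""   -- return redirect_uris[0]

-- ===== PORT B =====
-- _rank(uri): index of first preferred prefix uri starts with, or len(_PREFIXES)
def pvRank (u : String) : Nat :=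
  pvPrefixes.findIdx (fun p => PySem.Str.startswith u p)

def pick_console_redirect_uri_py_alt (client_config : List (String × List String)) : String :=
  match pvUris client_config with
  | [] => ""   -- Python raises ValueError here; excluded by Pre_
  | b :: rest =>
    (rest.foldl
      (fun (acc : String × Nat) u =>
        let r := pvRank u
        if r < acc.2 then (u, r) else acc)
      (b, pvRank b)).1

-- ===== PRECONDITION & SPEC =====
-- Pre_ excludes exactly the configs whose (stripped) redirect_uris list is empty, where A raises ValueError.
def Pre_pick_console_redirect_uri_py (client_config : List (String × List String)) : Prop :=
  ∃ v ∈ (PySem.Dict.mk client_config).getD "redirect_uris" [], PySem.Str.strip v ≠ ""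
instance (client_config : List (String × List String)) : Decidable (Pre_pick_console_redirect_uri_py client_config) := by unfold Pre_pick_console_redirect_uri_py; infer_instance

def pvWitness_pick_console_redirect_uri_py : (List (String × List String)) :=
  [("redirect_uris", ["https://example.com/cb", "http://localhost:8080/"])]

def Spec_pick_console_redirect_uri_py (client_config : List (String × List String)) (out : String) : Prop := out = pick_console_redirect_uri_py_alt client_config
instance (client_config : List (String × List String)) (out : String) : Decidable (Spec_pick_console_redirect_uri_py client_config out) := by unfold Spec_pick_console_redirect_uri_py; infer_instance

-- ===== CLAIM (what is proved, stated in full; the proofs are below) =====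
def Claim_equal_pick_console_redirect_uri_py : Prop := ∀ (client_config : List (String × List String)), Dom_pick_console_redirect_uri_py client_config → Pre_pick_console_redirect_uri_py client_config → Spec_pick_console_redirect_uri_py client_config (pick_console_redirect_uri_py client_config)

-- ===== LEMMAS AND PROOFS =====

-- rank with respect to an arbitrary prefix list (pvRank = pvRankPs pvPrefixes)
def pvRankPs (ps : List String) (u : String) : Nat :=
  ps.findIdx (fun p => PySem.Str.startswith u p)

-- minimum rank over a list of uris (init ps.length is an upper bound of every rank)
def pvMinR (ps : List String) (us : List String) : Nat :=
  us.foldr (fun u m => min (pvRankPs ps u) m) ps.length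

theorem pvRankPs_le (ps : List String) (u : String) : pvRankPs ps u ≤ ps.length :=
  List.findIdx_le_length

theorem pvMinR_le (ps : List String) : ∀ {us : List String} {u : String}, u ∈ us →
    pvMinR ps us ≤ pvRankPs ps u := by
  intro us
  induction us with
  | nil => intro u h; cases h
  | cons a t ih =>
    intro u h
    rcases List.mem_cons.mp h with rfl | h'
    · simp only [pvMinR, List.foldr_cons]
      exact min_le_left _ _
    · simp only [pvMinR, List.foldr_cons]
      exact le_trans (min_le_right _ _) (ih h')

theorem pvMinR_le_len (ps : List String) (us : List String) : pvMinR ps us ≤ ps.length := by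
  induction us with
  | nil => simp [pvMinR]
  | cons a t ih =>
    simp only [pvMinR, List.foldr_cons] at *
    exact le_trans (min_le_right _ _) ih

theorem find?_congr_mem {α : Type} {f g : α → Bool} :
    ∀ (l : List α), (∀ x ∈ l, f x = g x) → l.find? f = l.find? g := by
  intro l
  induction l with
  | nil => intro _; rfl
  | cons a t ih =>
    intro h
    simp only [List.find?_cons]
    rw [h a (List.mem_cons_self), ih (fun x hx => h x (List.mem_cons_of_mem _ hx))]

theorem pvMinR_succ {p : String} {ps : List String} {us : List String}
    (h : ∀ x ∈ us, PySem.Str.startswith x p = false) :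
    pvMinR (p :: ps) us = pvMinR ps us + 1 := by
  induction us with
  | nil => simp [pvMinR]
  | cons a t ih =>
    have ha := h a (List.mem_cons_self)
    have ht := ih (fun x hx => h x (List.mem_cons_of_mem _ hx))
    simp only [pvMinR, List.foldr_cons] at *
    rw [ht, pvRankPs, List.findIdx_cons, ha]
    simp only [cond_false]
    have hra : pvRankPs ps a = List.findIdx (fun q => PySem.Str.startswith a q) ps := rfl
    rw [← hra]
    omega

-- rank over p::ps is 0 exactly when the uri starts with p
theorem pvRankPs_cons (p : String) (ps : List String) (u : String) :
    pvRankPs (p :: ps) u =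
      if PySem.Str.startswith u p then 0 else pvRankPs ps u + 1 := by
  simp only [pvRankPs, List.findIdx_cons]
  cases h : PySem.Str.startswith u p <;> simp [h]

-- A's loop returns exactly the first uri of minimal rank
theorem lemA : ∀ (ps us : List String), us ≠ [] →
    us.find? (fun u => pvRankPs ps u == pvMinR ps us) =
      some ((pvLoopA ps us).getD (us.headD "")) := by
  intro ps
  induction ps with
  | nil =>
    intro us hne
    cases us with
    | nil => exact absurd rfl hne
    | cons b t =>
      have hm : pvMinR [] (b :: t) = 0 := by
        have := pvMinR_le_len [] (b :: t)
        simp only [List.length_nil] at this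
        omega
      have hb : (pvRankPs [] b == pvMinR [] (b :: t)) = true := by
        simp [pvRankPs, hm]
      rw [List.find?_cons_of_pos (p := fun x => pvRankPs [] x == pvMinR [] (b :: t)) hb]
      simp [pvLoopA]
  | cons p ps ih =>
    intro us hne
    cases hf : us.find? (fun u => PySem.Str.startswith u p) with
    | some u =>
      have hmem : u ∈ us := List.mem_of_find?_eq_some hf
      have hp : PySem.Str.startswith u p = true := by
        have := List.find?_some hf; simpa using this
      have hmin0 : pvMinR (p :: ps) us = 0 := by
        have h1 := pvMinR_le (p :: ps) hmem
        have h2 : pvRankPs (p :: ps) u = 0 := by rw [pvRankPs_cons, hp]; rfl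
        omega
      have hcong : us.find? (fun u => pvRankPs (p :: ps) u == pvMinR (p :: ps) us)
          = us.find? (fun u => PySem.Str.startswith u p) := by
        apply find?_congr_mem
        intro x _
        rw [hmin0, pvRankPs_cons]
        cases hx : PySem.Str.startswith x p <;> simp [hx]
      have hl : pvLoopA (p :: ps) us = some u := by
        simp only [pvLoopA, hf]
      rw [hcong, hf, hl]
      rfl
    | none =>
      have hall : ∀ x ∈ us, PySem.Str.startswith x p = false := by
        intro x hx
        have := List.find?_eq_none.mp hf x hx
        simpa using this
      have hms := pvMinR_succ (ps := ps) hall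
      have hcong : us.find? (fun u => pvRankPs (p :: ps) u == pvMinR (p :: ps) us)
          = us.find? (fun u => pvRankPs ps u == pvMinR ps us) := by
        apply find?_congr_mem
        intro x hx
        rw [hms, pvRankPs_cons, hall x hx]
        simp
      have hl : pvLoopA (p :: ps) us = pvLoopA ps us := by
        simp only [pvLoopA, hf]
      rw [hcong, ih us hne, hl]

-- B's fold step
def pvStep (acc : String × Nat) (u : String) : String × Nat :=
  let r := pvRank u
  if r < acc.2 then (u, r) else acc

theorem pvRank_eq (u : String) : pvRank u = pvRankPs pvPrefixes u := rfl

-- B's argmin fold also returns exactly the first uri of minimal rank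
theorem lemB : ∀ (rest : List String) (b : String),
    (b :: rest).find? (fun u => pvRankPs pvPrefixes u == pvMinR pvPrefixes (b :: rest)) =
      some ((rest.foldl pvStep (b, pvRank b)).1) := by
  intro rest
  induction rest with
  | nil =>
    intro b
    have hb : (pvRankPs pvPrefixes b == pvMinR pvPrefixes [b]) = true := by
      have h1 := pvRankPs_le pvPrefixes b
      have hm : pvMinR pvPrefixes [b] = pvRankPs pvPrefixes b := by
        simp only [pvMinR, List.foldr_cons, List.foldr_nil]
        omega
      simp [hm]
    rw [List.find?_cons_of_pos (p := fun x => pvRankPs pvPrefixes x == pvMinR pvPrefixes [b]) hb]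
    rfl
  | cons u rest ih =>
    intro b
    have hmin : pvMinR pvPrefixes (b :: u :: rest)
        = min (pvRankPs pvPrefixes b) (pvMinR pvPrefixes (u :: rest)) := rfl
    have hmin2 : pvMinR pvPrefixes (u :: rest)
        = min (pvRankPs pvPrefixes u) (pvMinR pvPrefixes rest) := rfl
    have hmin3 : pvMinR pvPrefixes (b :: rest)
        = min (pvRankPs pvPrefixes b) (pvMinR pvPrefixes rest) := rfl
    simp only [List.foldl_cons]
    by_cases hlt : pvRankPs pvPrefixes u < pvRankPs pvPrefixes b
    · -- strictly smaller rank: b is replaced by u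
      have hstep : pvStep (b, pvRank b) u = (u, pvRank u) := by
        simp only [pvStep, pvRank_eq]
        rw [if_pos hlt]
      rw [hstep]
      have h1 : pvMinR pvPrefixes (u :: rest) ≤ pvRankPs pvPrefixes u :=
        pvMinR_le _ (List.mem_cons_self)
      have hm : pvMinR pvPrefixes (b :: u :: rest) = pvMinR pvPrefixes (u :: rest) := by
        rw [hmin]; omega
      have hb : (pvRankPs pvPrefixes b == pvMinR pvPrefixes (b :: u :: rest)) = false := by
        rw [hm]
        simp only [beq_iff_eq, Bool.eq_false_iff, ne_eq]
        omega
      rw [List.find?_cons_of_neg (p := fun x => pvRankPs pvPrefixes x == pvMinR pvPrefixes (b :: u :: rest)) (by simp only [hb]; exact Bool.false_ne_true), hm]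
      exact ih u
    · -- b keeps the running minimum
      have hstep : pvStep (b, pvRank b) u = (b, pvRank b) := by
        simp only [pvStep, pvRank_eq]
        rw [if_neg hlt]
      rw [hstep]
      have hm : pvMinR pvPrefixes (b :: u :: rest) = pvMinR pvPrefixes (b :: rest) := by
        rw [hmin, hmin2, hmin3]; omega
      rw [hm]
      by_cases hbm : pvRankPs pvPrefixes b = pvMinR pvPrefixes (b :: rest)
      · have hb : (pvRankPs pvPrefixes b == pvMinR pvPrefixes (b :: rest)) = true := by
          simp [hbm]
        have h1 := ih b
        rw [List.find?_cons_of_pos (p := fun x => pvRankPs pvPrefixes x == pvMinR pvPrefixes (b :: rest)) hb] at h1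
        rw [List.find?_cons_of_pos (p := fun x => pvRankPs pvPrefixes x == pvMinR pvPrefixes (b :: rest)) hb]
        exact h1
      · have hb : (pvRankPs pvPrefixes b == pvMinR pvPrefixes (b :: rest)) = false := by
          simp [hbm]
        have hble : pvMinR pvPrefixes (b :: rest) ≤ pvRankPs pvPrefixes b :=
          pvMinR_le _ (List.mem_cons_self)
        have hu : (pvRankPs pvPrefixes u == pvMinR pvPrefixes (b :: rest)) = false := by
          simp only [beq_iff_eq, Bool.eq_false_iff, ne_eq]
          omega
        have h1 := ih b
        have hb' : ¬ ((fun x => pvRankPs pvPrefixes x == pvMinR pvPrefixes (b :: rest)) b = true) := by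
          simp only [hb]; exact Bool.false_ne_true
        have hu' : ¬ ((fun x => pvRankPs pvPrefixes x == pvMinR pvPrefixes (b :: rest)) u = true) := by
          simp only [hu]; exact Bool.false_ne_true
        rw [List.find?_cons_of_neg (p := fun x => pvRankPs pvPrefixes x == pvMinR pvPrefixes (b :: rest)) hb'] at h1
        rw [List.find?_cons_of_neg (p := fun x => pvRankPs pvPrefixes x == pvMinR pvPrefixes (b :: rest)) hb',
            List.find?_cons_of_neg (p := fun x => pvRankPs pvPrefixes x == pvMinR pvPrefixes (b :: rest)) hu']
        exact h1

theorem pre_iff_ne_nil (client_config : List (String × List String)) :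
    Pre_pick_console_redirect_uri_py client_config ↔ pvUris client_config ≠ [] := by
  unfold Pre_pick_console_redirect_uri_py pvUris
  rw [Ne, List.filter_eq_nil_iff]
  constructor
  · rintro ⟨v, hv, hne⟩ hall
    have := hall (PySem.Str.strip v) (List.mem_map_of_mem hv)
    simp at this
    exact hne this
  · intro h
    by_contra hno
    apply h
    intro s hs
    rcases List.mem_map.mp hs with ⟨v, hv, rfl⟩
    have : ¬ PySem.Str.strip v ≠ "" := fun hc => hno ⟨v, hv, hc⟩
    simpa using this

-- ===== VERDICT (by name: the statement is the Claim_ definition above) =====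
theorem pick_console_redirect_uri_py_spec : Claim_equal_pick_console_redirect_uri_py := by
  intro client_config _ hpre
  unfold Spec_pick_console_redirect_uri_py
  unfold pick_console_redirect_uri_py pick_console_redirect_uri_py_alt
  have hne := (pre_iff_ne_nil client_config).mp hpre
  cases hus : pvUris client_config with
  | nil => exact absurd hus hne
  | cons b rest =>
    simp only [List.isEmpty_cons, Bool.false_eq_true, if_false]
    have hA := lemA pvPrefixes (b :: rest) (by simp)
    have hB := lemB rest b
    have hval : ((pvLoopA pvPrefixes (b :: rest)).getD ((b :: rest).headD ""))
        = (rest.foldl pvStep (b, pvRank b)).1 :=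
      Option.some.inj (hA.symm.trans hB)
    cases hl : pvLoopA pvPrefixes (b :: rest) with
    | some u =>
      rw [hl] at hval
      exact hval
    | none =>
      rw [hl] at hval
      exact hval
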